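-- pv_equiv track=rewrite | github.com/pierlj/PGROU | Iguana sources/Iguana.py | lastAns
-- ===== SOURCE A (Python) =====
-- def lastAns(lines):
--     res=0
--     line=lines[0]
--     for k in range(len(lines)):
--         if( "Answer" in lines[k]):
--             res=res+1
--             line=lines[k+1]
--     return line
-- ===== SOURCE B (Python) =====
-- def lastAns(lines):
--     line = lines[0]
--     for k in range(len(lines) - 1, -1, -1):
--         if "Answer" in lines[k]:
--             line = lines[k + 1]
--             break
--     return line
-- ===== Notes on version B (the rewrite author's own statement) =====
-- stated objective: simpler
-- what changed: Replaces the full forward scan that overwrites the result at every 'Answer' match (and keeps an unused counter) by a reverse scan that stops at the first match from the end.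
import Mathlib
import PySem

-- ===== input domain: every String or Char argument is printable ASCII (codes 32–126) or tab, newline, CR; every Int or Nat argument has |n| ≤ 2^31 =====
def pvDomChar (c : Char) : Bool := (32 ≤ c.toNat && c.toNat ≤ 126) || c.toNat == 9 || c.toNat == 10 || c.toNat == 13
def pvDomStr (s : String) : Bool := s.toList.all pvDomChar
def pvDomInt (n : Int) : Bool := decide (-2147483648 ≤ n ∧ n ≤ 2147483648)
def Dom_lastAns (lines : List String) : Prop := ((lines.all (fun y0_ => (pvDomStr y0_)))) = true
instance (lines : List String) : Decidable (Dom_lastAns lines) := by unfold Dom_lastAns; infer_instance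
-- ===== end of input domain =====

-- B replaces A's full forward scan (which overwrites the result at each 'Answer' match and
-- keeps an unused counter) by a reverse scan stopping at the first match from the end: simpler.

-- ===== PORT A =====
-- res=0; line=lines[0]; for k in range(len(lines)): if "Answer" in lines[k]: res+=1; line=lines[k+1]
-- (indexing via pyGetD; Pre_ guarantees every index read by either program is in range)
def lastAns (lines : List String) : String :=
  let st :=
    (PySem.List.pyRange 0 (lines.length : Int) 1).foldl
      (fun (st : Int × String) k =>
        if PySem.Str.isIn "Answer" (PySem.List.pyGetD lines k "") then
          (st.1 + 1, PySem.List.pyGetD lines (k + 1) "")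
        else st)
      (0, PySem.List.pyGetD lines 0 "")
  st.2

-- ===== PORT B =====
-- reverse scan with early exit (break), ported as structural recursion over the countdown range
def lastAnsGo (lines : List String) : List Int → String → String
  | [], line => line
  | k :: ks, line =>
    if PySem.Str.isIn "Answer" (PySem.List.pyGetD lines k "") then
      PySem.List.pyGetD lines (k + 1) ""
    else lastAnsGo lines ks line

def lastAns_alt (lines : List String) : String :=
  lastAnsGo lines (PySem.List.pyRange ((lines.length : Int) - 1) (-1) (-1))
    (PySem.List.pyGetD lines 0 "")

-- ===== PRECONDITION & SPEC =====
-- Pre_ excludes exactly the inputs where the Python A raises IndexError: the empty list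
-- (lines[0]) and lists whose LAST line contains "Answer" (then line=lines[k+1] with k+1=len).
-- B raises on exactly the same inputs.
def Pre_lastAns (lines : List String) : Prop :=
  lines ≠ [] ∧ PySem.Str.isIn "Answer" (PySem.List.pyGetD lines (-1) "") = false
instance (lines : List String) : Decidable (Pre_lastAns lines) := by unfold Pre_lastAns; infer_instance

def pvWitness_lastAns : List String := ["Answer is:", "42", "end"]

def Spec_lastAns (lines : List String) (out : String) : Prop := out = lastAns_alt lines
instance (lines : List String) (out : String) : Decidable (Spec_lastAns lines out) := by unfold Spec_lastAns; infer_instance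

-- ===== CLAIM (what is proved, stated in full; the proofs are below) =====
def Claim_equal_lastAns : Prop := ∀ (lines : List String), Dom_lastAns lines → Pre_lastAns lines → Spec_lastAns lines (lastAns lines)

-- ===== LEMMAS AND PROOFS =====

-- B's early-exit scan returns f(first index in ks satisfying p), else the initial line.
theorem lastAnsGo_eq_find (lines : List String) (ks : List Int) (init : String) :
    lastAnsGo lines ks init =
      match ks.find? (fun k => PySem.Str.isIn "Answer" (PySem.List.pyGetD lines k "")) with
      | some k => PySem.List.pyGetD lines (k + 1) ""
      | none => init := by
  induction ks with
  | nil => rfl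
  | cons k ks ih =>
    cases h : PySem.Str.isIn "Answer" (PySem.List.pyGetD lines k "") with
    | true => simp at h; simp [lastAnsGo, List.find?, h]
    | false => simp at h; simp [lastAnsGo, List.find?, h, ih]

-- A's overwrite-at-every-match fold returns f(last match in ks) = f(first match in ks.reverse).
theorem foldl_eq_find_reverse (lines : List String) (ks : List Int) (st : Int × String) :
    (ks.foldl
      (fun (st : Int × String) k =>
        if PySem.Str.isIn "Answer" (PySem.List.pyGetD lines k "") then
          (st.1 + 1, PySem.List.pyGetD lines (k + 1) "")
        else st) st).2 =
      match ks.reverse.find? (fun k => PySem.Str.isIn "Answer" (PySem.List.pyGetD lines k "")) with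
      | some k => PySem.List.pyGetD lines (k + 1) ""
      | none => st.2 := by
  induction ks generalizing st with
  | nil => rfl
  | cons k ks ih =>
    simp only [List.foldl_cons, List.reverse_cons, List.find?_append]
    rw [ih]
    cases hf : ks.reverse.find? (fun k => PySem.Str.isIn "Answer" (PySem.List.pyGetD lines k "")) with
    | some j => simp
    | none =>
      cases h : PySem.Str.isIn "Answer" (PySem.List.pyGetD lines k "") with
      | true => simp at h; simp [List.find?, h]
      | false => simp at h; simp [List.find?, h]

-- ===== VERDICT (by name: the statement is the Claim_ definition above) =====
theorem lastAns_spec : Claim_equal_lastAns := by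
  intro lines _ _
  unfold Spec_lastAns lastAns lastAns_alt
  rw [lastAnsGo_eq_find, foldl_eq_find_reverse]
  rw [show (PySem.List.pyRange ((lines.length : Int) - 1) (-1) (-1)) =
        (PySem.List.pyRange 0 (lines.length : Int) 1).reverse by
      simpa using PySem.List.pyRange_neg_one_eq_reverse ((lines.length : Int) - 1) (-1)]
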